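-- pv_equiv track=rewrite | github.com/MrBonzzo/LinearSpectrum | LinearSpectrum.py | getind
-- ===== SOURCE A (Python) =====
-- def getind(temp, bytelen):
--     """
--     Вычисление индексов нулевых столбцов.
--
--     Arguments:
--     temp -- дизъюнкция векторов.
--     bytelen -- длина векторов.
--
--     Return:
--     zeros -- список, состоящий из индексов нулевых столбцов.
--     """
--     zeros = []
--     tempstr = bin(temp)[2:]
--     templen = len(tempstr)
--     # если все вектора начинаются с нулей
--     if templen < bytelen:
--         zeros = [bytelen-1 - i for i in range(bytelen-templen)]
--     # вычисление индексов нулевых строк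
--     for i in range(templen):
--         if tempstr[i] == '0':
--             zeros.append(templen-1-i)
--     return zeros
-- ===== SOURCE B (Python) =====
-- def getind(temp, bytelen):
--     # Complement-of-ones strategy: collect the ONE-bit positions of temp into a
--     # set by a low-to-high shift loop, then the answer is the set difference
--     # range(n) minus that set, sorted in descending order.
--     # (For temp < 0 this loop does not terminate; see Pre_ in the claim.)
--     ones = set()
--     t, pos = temp, 0
--     while t:
--         if t & 1:
--             ones.add(pos)
--         t >>= 1
--         pos += 1
--     n = max(bytelen, pos, 1)
--     return sorted(set(range(n)) - ones, reverse=True)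
-- ===== Notes on version B (the rewrite author's own statement) =====
-- stated objective: alternative
-- what changed: B inverts the problem: instead of scanning the binary string high-to-low emitting zero indices directly (plus a separate leading-zeros branch), it collects the ONE-bit positions into a set by a low-to-high shift loop, takes the set difference set(range(n)) - ones, and sorts the complement descending.
-- outside the precondition, e.g. on getind(-5, 4): A returns [1], B does not finish within the time limit
import Mathlib
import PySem

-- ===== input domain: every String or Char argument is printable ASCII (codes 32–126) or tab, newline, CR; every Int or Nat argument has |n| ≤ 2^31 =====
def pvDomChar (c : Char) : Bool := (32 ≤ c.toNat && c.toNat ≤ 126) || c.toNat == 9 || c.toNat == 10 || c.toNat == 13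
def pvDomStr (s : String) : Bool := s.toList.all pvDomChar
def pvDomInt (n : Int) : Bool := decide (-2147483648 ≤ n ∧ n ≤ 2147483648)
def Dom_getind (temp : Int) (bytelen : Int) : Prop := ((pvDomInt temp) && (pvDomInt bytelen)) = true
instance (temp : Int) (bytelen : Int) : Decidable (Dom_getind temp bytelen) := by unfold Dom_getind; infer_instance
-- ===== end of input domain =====

-- B inverts the problem: it collects the ONE-bit positions into a set by a low-to-high shift
-- loop and returns sorted(set(range(n)) - ones, reverse=True) (alternative, same cost).

-- ===== PORT A =====
-- Hand port of the binary digit characters of a positive Nat, MSB first.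
def pvNatBits : Nat → List Char
  | 0 => []
  | (n+1) => pvNatBits ((n+1)/2) ++ [if (n+1) % 2 = 1 then '1' else '0']
decreasing_by exact Nat.div_lt_self n.succ_pos one_lt_two

-- Hand port of bin(temp)[2:], exact for every int: bin(0)[2:] = '0', and for temp < 0 the
-- slice of '-0b…' keeps the 'b' in front of the digits of |temp|.
def pvBinSlice (temp : Int) : List Char :=
  if temp < 0 then 'b' :: pvNatBits temp.natAbs
  else if temp = 0 then ['0']
  else pvNatBits temp.toNat

def getind (temp : Int) (bytelen : Int) : List Int :=
  let tempstr : List Char := pvBinSlice temp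
  let templen : Int := tempstr.length
  let zeros : List Int :=
    if templen < bytelen then
      (PySem.List.pyRange 0 (bytelen - templen) 1).map (fun i => bytelen - 1 - i)
    else []
  (PySem.List.pyRange 0 templen 1).foldl
    (fun acc i => if PySem.List.pyGetD tempstr i ' ' = '0' then acc ++ [templen - 1 - i] else acc)
    zeros

-- ===== PORT B =====
-- The 'while t:' loop of Source B: 't >>= 1' is exactly floor division by 2 in Python.
-- Python's loop does not terminate for t < 0; the 't ≤ 0' guard stops there instead
-- (those inputs are outside Pre_getind, so nothing is claimed about them).
def pvOnesLoop (t : Int) (pos : Int) (ones : PySem.Set Int) : Int × PySem.Set Int :=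
  if t ≤ 0 then (pos, ones)
  else pvOnesLoop (PySem.Int.floordiv t 2) (pos + 1)
        (if PySem.Int.band t 1 ≠ 0 then PySem.Set.add ones pos else ones)
termination_by t.toNat
decreasing_by
  rw [PySem.Int.floordiv_eq_ediv_of_pos (by omega)]
  omega

def getind_alt (temp : Int) (bytelen : Int) : List Int :=
  let r := pvOnesLoop temp 0 PySem.Set.empty
  let n : Int := max (max bytelen r.1) 1
  PySem.List.sorted (PySem.Set.diff (PySem.Set.ofList (PySem.List.pyRange 0 n 1)) r.2)
    (fun x => x) true

-- ===== PRECONDITION & SPEC =====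
-- Pre_ excludes negative temp, outside the function's natural domain (temp is a disjunction
-- of nonnegative bit vectors): A still returns there, but its value is an artifact of the
-- slice bin(temp)[2:] keeping the 'b' of the '-0b' prefix as a spurious nonzero column,
-- and B's shift loop does not terminate there.
def Pre_getind (temp : Int) (bytelen : Int) : Prop := 0 ≤ temp
instance (temp : Int) (bytelen : Int) : Decidable (Pre_getind temp bytelen) := by
  unfold Pre_getind; infer_instance
def pvWitness_getind : Int × Int := (37, 8)
def Spec_getind (temp : Int) (bytelen : Int) (out : List Int) : Prop := out = getind_alt temp bytelen
instance (temp : Int) (bytelen : Int) (out : List Int) : Decidable (Spec_getind temp bytelen out) := by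
  unfold Spec_getind; infer_instance

-- ===== CLAIM (what is proved, stated in full; the proofs are below) =====
def Claim_equal_getind : Prop := ∀ (temp : Int) (bytelen : Int), Dom_getind temp bytelen → Pre_getind temp bytelen → Spec_getind temp bytelen (getind temp bytelen)

-- ===== LEMMAS AND PROOFS =====
-- the common normal form: the zero-bit positions N-1, …, 0 of t, descending
def pvC (t : Nat) (N : Nat) : List Int :=
  ((List.range N).filter (fun k => t / 2 ^ (N - 1 - k) % 2 = 0)).map
    (fun k => ((N - 1 - k : Nat) : Int))

theorem pvBitLen_pos (t : Nat) (ht : 0 < t) : 0 < PySem.Int.bitLength (t : Int) := by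
  by_contra h
  have h0 : PySem.Int.bitLength (t : Int) = 0 := by omega
  have := PySem.Int.lt_two_pow_bitLength (t : Int)
  rw [h0] at this
  simp at this
  omega

theorem pvNatBits_eq (m : Nat) (hm : 0 < m) :
    pvNatBits m = (List.range (PySem.Int.bitLength (m : Int))).reverse.map
      (fun pos => if m / 2 ^ pos % 2 = 1 then '1' else '0') := by
  induction m using Nat.strong_induction_on with
  | _ m IH =>
    obtain ⟨n, rfl⟩ : ∃ n, m = n + 1 := ⟨m - 1, by omega⟩
    rw [pvNatBits, PySem.Int.bitLength_natCast hm]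
    by_cases h2 : (n+1)/2 = 0
    · have hn : n = 0 := by omega
      subst hn
      simp [h2, pvNatBits]
    · rw [IH ((n+1)/2) (Nat.div_lt_self hm one_lt_two) (by omega)]
      rw [List.range_succ_eq_map]
      rw [List.reverse_cons, List.map_append, List.map_reverse, List.map_reverse, List.map_map]
      congr 1
      · congr 1
        apply List.map_congr_left
        intro pos _
        simp only [Function.comp_apply]
        have hpp : (n+1)/2/2^pos = (n+1)/2^(pos+1) := by
          rw [Nat.div_div_eq_div_mul, ← pow_succ']
        rw [hpp]
      · simp

theorem tempstr_eq (t : Nat) :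
    pvBinSlice (t : Int) = (List.range (max (PySem.Int.bitLength (t : Int)) 1)).reverse.map
      (fun pos => if t / 2 ^ pos % 2 = 1 then '1' else '0') := by
  by_cases ht : t = 0
  · subst ht
    simp [pvBinSlice, PySem.Int.bitLength_zero]
  · have htp : 0 < t := by omega
    have hbl := pvBitLen_pos t htp
    have hmax : max (PySem.Int.bitLength (t : Int)) 1 = PySem.Int.bitLength (t : Int) := by omega
    rw [hmax]
    have h1 : ¬ ((t : Int) < 0) := by omega
    have h2 : ¬ ((t : Int) = 0) := by omega
    simp only [pvBinSlice, if_neg h1, if_neg h2, Int.toNat_natCast]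
    exact pvNatBits_eq t htp

theorem pvLoop_eq (t M : Nat) (zeros : List Int) :
    (PySem.List.pyRange 0 (M : Int) 1).foldl
      (fun acc i => if PySem.List.pyGetD ((List.range M).reverse.map
          (fun pos => if t / 2 ^ pos % 2 = 1 then '1' else '0')) i ' ' = '0'
        then acc ++ [(M : Int) - 1 - i] else acc) zeros
    = zeros ++ pvC t M := by
  rw [PySem.List.foldl_append_ite]
  congr 1
  rw [PySem.List.pyRange_one, List.filter_map, List.map_map]
  simp only [Int.sub_zero, Int.toNat_natCast, zero_add, Function.comp_def]
  have hfc : ∀ k ∈ List.range M,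
      (decide (PySem.List.pyGetD ((List.range M).reverse.map
          (fun pos => if t / 2 ^ pos % 2 = 1 then '1' else '0')) (k : Int) ' ' = '0'))
      = decide (t / 2 ^ (M - 1 - k) % 2 = 0) := by
    intro k hk
    simp only [List.mem_range] at hk
    rw [PySem.List.pyGetD_natCast]
    rw [List.getD_eq_getElem _ _ (by simp [hk])]
    rw [List.getElem_map, List.getElem_reverse, List.getElem_range]
    simp only [List.length_range]
    rcases Nat.mod_two_eq_zero_or_one (t / 2 ^ (M - 1 - k)) with h | h <;> simp [h]
  rw [List.filter_congr hfc]
  unfold pvC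
  apply List.map_congr_left
  intro k hk
  simp only [List.mem_filter, List.mem_range] at hk
  omega

theorem pvC_pad (t M P : Nat) (htlt : t < 2 ^ M) :
    (List.range P).map (fun k : Nat => ((P + M : Nat) : Int) - 1 - (k : Int)) ++ pvC t M
      = pvC t (P + M) := by
  unfold pvC
  rw [List.range_add, List.filter_append, List.map_append]
  congr 1
  · have hfill : (List.range P).filter (fun k => decide (t / 2 ^ (P + M - 1 - k) % 2 = 0))
        = List.range P := by
      rw [List.filter_eq_self]
      intro a ha
      simp only [List.mem_range] at ha
      have hMle : M ≤ P + M - 1 - a := by omega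
      have hz : t / 2 ^ (P + M - 1 - a) = 0 :=
        Nat.div_eq_of_lt (lt_of_lt_of_le htlt (Nat.pow_le_pow_right (by norm_num) hMle))
      simp [hz]
    rw [hfill]
    apply List.map_congr_left
    intro a ha
    simp only [List.mem_range] at ha
    omega
  · rw [List.filter_map, List.map_map]
    have hfc : ∀ k ∈ List.range M,
        ((fun x => decide (t / 2 ^ (P + M - 1 - x) % 2 = 0)) ∘ (fun x => P + x)) k
          = decide (t / 2 ^ (M - 1 - k) % 2 = 0) := by
      intro k _
      simp only [Function.comp_apply]
      rw [show P + M - 1 - (P + k) = M - 1 - k from by omega]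
    rw [List.filter_congr hfc]
    apply List.map_congr_left
    intro k hk
    simp only [List.mem_filter, List.mem_range] at hk
    simp only [Function.comp_apply]
    congr 1
    omega

theorem getind_eq_pvC (t : Nat) (bytelen : Int) :
    getind (t : Int) bytelen
      = pvC t ((max bytelen ((max (PySem.Int.bitLength (t : Int)) 1 : Nat) : Int)).toNat) := by
  have htlt : t < 2 ^ (max (PySem.Int.bitLength (t : Int)) 1) := by
    have h1 := PySem.Int.lt_two_pow_bitLength (t : Int)
    simp only [Int.natAbs_natCast] at h1
    exact lt_of_lt_of_le h1 (Nat.pow_le_pow_right (by norm_num) (le_max_left _ _))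
  unfold getind
  rw [tempstr_eq t]
  simp only [List.length_map, List.length_reverse, List.length_range]
  rw [pvLoop_eq t (max (PySem.Int.bitLength (t : Int)) 1)]
  by_cases hb : ((max (PySem.Int.bitLength (t : Int)) 1 : Nat) : Int) < bytelen
  · rw [if_pos hb]
    have hN : (max bytelen ((max (PySem.Int.bitLength (t : Int)) 1 : Nat) : Int)).toNat
        = (bytelen - (max (PySem.Int.bitLength (t : Int)) 1 : Nat)).toNat
          + max (PySem.Int.bitLength (t : Int)) 1 := by omega
    rw [hN, ← pvC_pad t _ _ htlt]
    congr 1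
    rw [PySem.List.pyRange_one]
    simp only [Int.sub_zero]
    rw [List.map_map]
    apply List.map_congr_left
    intro k hk
    simp only [List.mem_range] at hk
    simp only [Function.comp_apply]
    omega
  · rw [if_neg hb, List.nil_append]
    congr 1
    omega

-- ===== B-side lemmas =====
-- the shift loop returns (pos + bit_length t, ones ∪ {pos + p | bit p of t set})
theorem pvOnesLoop_spec (m : Nat) (pos : Int) (ones : PySem.Set Int) :
    (pvOnesLoop (m : Int) pos ones).1 = pos + (PySem.Int.bitLength (m : Int) : Int) ∧
    ∀ x, x ∈ (pvOnesLoop (m : Int) pos ones).2 ↔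
      x ∈ ones ∨ ∃ p : Nat, m / 2 ^ p % 2 = 1 ∧ x = pos + (p : Int) := by
  induction m using Nat.strong_induction_on generalizing pos ones with
  | _ m IH =>
    by_cases hm : m = 0
    · subst hm
      rw [pvOnesLoop, if_pos (by omega)]
      refine ⟨by simp [PySem.Int.bitLength_zero], fun x => ?_⟩
      simp
    · have hmp : 0 < m := by omega
      rw [pvOnesLoop, if_neg (by omega)]
      rw [show PySem.Int.floordiv (m : Int) 2 = ((m / 2 : Nat) : Int) from
        PySem.Int.floordiv_natCast m 2]
      have hband : PySem.Int.band (m : Int) 1 = ((m % 2 : Nat) : Int) := by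
        rw [show (1 : Int) = ((1 : Nat) : Int) from rfl, PySem.Int.band_natCast,
          Nat.and_one_is_mod]
      obtain ⟨IH1, IH2⟩ := IH (m / 2) (Nat.div_lt_self hmp one_lt_two) (pos + 1)
        (if PySem.Int.band (m : Int) 1 ≠ 0 then PySem.Set.add ones pos else ones)
      refine ⟨?_, fun x => ?_⟩
      · rw [IH1, PySem.Int.bitLength_natCast hmp]
        push_cast
        ring
      · rw [IH2]
        have hmem : x ∈ (if PySem.Int.band (m : Int) 1 ≠ 0 then PySem.Set.add ones pos else ones)
            ↔ x ∈ ones ∨ (m % 2 = 1 ∧ x = pos) := by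
          rw [hband]
          rcases Nat.mod_two_eq_zero_or_one m with h | h
          · simp [h]
          · simp [h, PySem.Set.mem_add]
        rw [hmem]
        constructor
        · rintro ((h | ⟨h1, h2⟩) | ⟨p, hp, hx⟩)
          · exact Or.inl h
          · exact Or.inr ⟨0, by simpa using h1, by simp [h2]⟩
          · refine Or.inr ⟨p + 1, ?_, by push_cast at hx ⊢; omega⟩
            rw [pow_succ', ← Nat.div_div_eq_div_mul]
            exact hp
        · rintro (h | ⟨p, hp, hx⟩)
          · exact Or.inl (Or.inl h)
          · match p with
            | 0 => exact Or.inl (Or.inr ⟨by simpa using hp, by simpa using hx⟩)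
            | (q+1) =>
              refine Or.inr ⟨q, ?_, by push_cast at hx ⊢; omega⟩
              rw [pow_succ', ← Nat.div_div_eq_div_mul] at hp
              exact hp

theorem pvC_mem (t N : Nat) (x : Int) :
    x ∈ pvC t N ↔ 0 ≤ x ∧ x < (N : Int) ∧ t / 2 ^ x.toNat % 2 = 0 := by
  unfold pvC
  simp only [List.mem_map, List.mem_filter, List.mem_range, decide_eq_true_eq]
  constructor
  · rintro ⟨k, ⟨hk, hbit⟩, rfl⟩
    have hlt : N - 1 - k < N := by omega
    refine ⟨by positivity, by exact_mod_cast hlt, ?_⟩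
    simpa using hbit
  · rintro ⟨h0, hN, hbit⟩
    refine ⟨N - 1 - x.toNat, ⟨by omega, ?_⟩, by omega⟩
    rw [show N - 1 - (N - 1 - x.toNat) = x.toNat from by omega]
    exact hbit

theorem pvC_pairwise (t N : Nat) : (pvC t N).Pairwise (fun a b : Int => b < a) := by
  unfold pvC
  rw [List.pairwise_map]
  apply List.Pairwise.filter
  rw [List.pairwise_iff_getElem]
  intro i j hi hj hij
  simp only [List.getElem_range] at *
  simp only [List.length_range] at hi hj
  have : N - 1 - j < N - 1 - i := by omega
  exact_mod_cast this

theorem pvC_nodup (t N : Nat) : (pvC t N).Nodup :=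
  (pvC_pairwise t N).imp (fun h => by omega)

theorem getind_alt_eq_pvC (t : Nat) (bytelen : Int) :
    getind_alt (t : Int) bytelen
      = pvC t ((max bytelen ((max (PySem.Int.bitLength (t : Int)) 1 : Nat) : Int)).toNat) := by
  obtain ⟨h1, h2⟩ := pvOnesLoop_spec t 0 PySem.Set.empty
  set N : Nat := (max bytelen ((max (PySem.Int.bitLength (t : Int)) 1 : Nat) : Int)).toNat with hNdef
  have hn : max (max bytelen (pvOnesLoop (t : Int) 0 PySem.Set.empty).1) 1 = (N : Int) := by
    rw [h1]
    omega
  have halt : getind_alt (t : Int) bytelen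
      = PySem.List.sorted (PySem.Set.diff
          (PySem.Set.ofList (PySem.List.pyRange 0
            (max (max bytelen (pvOnesLoop (t : Int) 0 PySem.Set.empty).1) 1) 1))
          (pvOnesLoop (t : Int) 0 PySem.Set.empty).2) (fun x => x) true := rfl
  rw [halt, hn]
  apply PySem.List.sorted_rev_eq_of_perm_of_pairwise_gt
  · rw [List.perm_ext_iff_of_nodup (pvC_nodup t N)
      (PySem.Set.nodup_diff _ _ (PySem.Set.nodup_ofList _))]
    intro x
    rw [pvC_mem, PySem.Set.mem_diff, PySem.Set.mem_ofList, PySem.List.mem_pyRange_one, h2]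
    have hbl : t < 2 ^ x.toNat → t / 2 ^ x.toNat % 2 = 0 := by
      intro h
      rw [Nat.div_eq_of_lt h]
    constructor
    · rintro ⟨hx0, hxN, hbit⟩
      refine ⟨⟨hx0, hxN⟩, ?_⟩
      rintro (h | ⟨p, hp, rfl⟩)
      · simp at h
      · simp only [zero_add] at hbit ⊢
        rw [Int.toNat_natCast] at hbit
        omega
    · rintro ⟨⟨hx0, hxN⟩, hno⟩
      refine ⟨hx0, hxN, ?_⟩
      rcases Nat.mod_two_eq_zero_or_one (t / 2 ^ x.toNat) with h | h
      · exact h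
      · exact absurd (Or.inr ⟨x.toNat, h, by omega⟩) hno
  · exact pvC_pairwise t N

-- ===== VERDICT (by name: the statement is the Claim_ definition above) =====
theorem getind_spec : Claim_equal_getind := by
  intro temp bytelen _ hpre
  unfold Spec_getind
  obtain ⟨t, rfl⟩ : ∃ t : Nat, temp = (t : Int) := ⟨temp.toNat, (Int.toNat_of_nonneg hpre).symm⟩
  rw [getind_eq_pvC, getind_alt_eq_pvC]
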